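-- pv_equiv track=rewrite | github.com/smkun/Landscaper-Python | Landscaper2.py | earn_money
-- ===== SOURCE A (Python) =====
-- def earn_money(tools):
--     # Calculate the amount of money earned based on the tools owned by the player.
--     # Each tool has a specific earning rate:
--     # - Teeth: $1 per day
--     # - Rusty Scissors: $5 per day
--     # - Old-timey Push Lawnmower: $50 per day
--     # - Fancy Battery-powered Lawnmower: $100 per day
--     # - Team of Starving Students: $250 per day
--     earnings = 0
--     for tool, count in tools.items():
--         if tool == "teeth":
--             earnings += 1 * count
--         elif tool == "scissors":
--             earnings += 5 * count
--         elif tool == "old-timey":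
--             earnings += 50 * count
--         elif tool == "fancy":
--             earnings += 100 * count
--         elif tool == "team":
--             earnings += 250 * count
--     return earnings
-- ===== SOURCE B (Python) =====
-- TIERS = (("teeth", 1), ("scissors", 5), ("old-timey", 50), ("fancy", 100), ("team", 250))
--
--
-- def earn_money(tools):
--     # Staged per-tier passes: for each pay tier, scan the inventory for that
--     # tool's holdings, weight the tier's total count by its rate, and add.
--     total = 0
--     for tool, rate in TIERS:
--         total += rate * sum(count for name, count in tools.items() if name == tool)
--     return total
-- ===== Notes on version B (the rewrite author's own statement) =====
-- stated objective: alternative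
-- what changed: B replaces A's single pass over the input with an if/elif branch per item by five staged passes, one per pay tier: each pass filter-sums the counts of that tier's tool over the whole inventory and weights the subtotal by the tier's rate.
import Mathlib
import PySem

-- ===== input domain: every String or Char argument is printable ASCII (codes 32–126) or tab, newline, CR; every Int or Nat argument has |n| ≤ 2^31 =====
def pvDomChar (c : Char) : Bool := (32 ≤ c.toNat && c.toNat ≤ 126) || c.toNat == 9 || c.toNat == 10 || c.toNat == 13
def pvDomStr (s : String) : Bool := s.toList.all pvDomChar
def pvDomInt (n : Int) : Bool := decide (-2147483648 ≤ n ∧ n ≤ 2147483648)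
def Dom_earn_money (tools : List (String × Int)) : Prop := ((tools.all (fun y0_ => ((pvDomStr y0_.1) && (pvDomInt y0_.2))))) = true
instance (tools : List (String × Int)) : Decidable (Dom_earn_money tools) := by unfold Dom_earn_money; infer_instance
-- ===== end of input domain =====

-- B replaces A's single branching pass by five staged passes, one per pay tier,
-- each filter-summing that tool's counts over the whole inventory (alternative).


-- ===== PORT A =====
def earn_money (tools : List (String × Int)) : Int :=
  tools.foldl (fun earnings p =>
    if p.1 == "teeth" then earnings + 1 * p.2
    else if p.1 == "scissors" then earnings + 5 * p.2
    else if p.1 == "old-timey" then earnings + 50 * p.2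
    else if p.1 == "fancy" then earnings + 100 * p.2
    else if p.1 == "team" then earnings + 250 * p.2
    else earnings) 0

-- ===== PORT B =====
def pvTiers : List (String × Int) :=
  [("teeth", 1), ("scissors", 5), ("old-timey", 50), ("fancy", 100), ("team", 250)]

-- Source B's inner generator sum: the counts of one tool's bindings across the inventory
def pvTierCount (tools : List (String × Int)) (tool : String) : Int :=
  ((tools.filter (fun q => q.1 == tool)).map (fun q => q.2)).sum

def earn_money_alt (tools : List (String × Int)) : Int :=
  pvTiers.foldl (fun total p => total + p.2 * pvTierCount tools p.1) 0

-- ===== PRECONDITION & SPEC =====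
def Spec_earn_money (tools : List (String × Int)) (out : Int) : Prop := out = earn_money_alt tools
instance (tools : List (String × Int)) (out : Int) : Decidable (Spec_earn_money tools out) := by unfold Spec_earn_money; infer_instance

-- ===== CLAIM (what is proved, stated in full; the proofs are below) =====
def Claim_equal_earn_money : Prop := ∀ (tools : List (String × Int)), Dom_earn_money tools → Spec_earn_money tools (earn_money tools)

-- ===== LEMMAS AND PROOFS =====

theorem pvAlt_nil : earn_money_alt [] = 0 := by decide

theorem pvTierCount_cons (k : String) (v : Int) (rest : List (String × Int)) (t : String) :
    pvTierCount ((k, v) :: rest) t =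
      (if k == t then v else 0) + pvTierCount rest t := by
  by_cases h : k == t <;> simp [pvTierCount, h]

theorem pvAlt_cons (k : String) (v : Int) (rest : List (String × Int)) :
    earn_money_alt ((k, v) :: rest) =
      (if k == "teeth" then 1 * v
       else if k == "scissors" then 5 * v
       else if k == "old-timey" then 50 * v
       else if k == "fancy" then 100 * v
       else if k == "team" then 250 * v
       else 0) + earn_money_alt rest := by
  simp only [earn_money_alt, pvTiers, List.foldl_cons, List.foldl_nil, pvTierCount_cons]
  by_cases h1 : k = "teeth" <;> by_cases h2 : k = "scissors" <;>
    by_cases h3 : k = "old-timey" <;> by_cases h4 : k = "fancy" <;>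
    by_cases h5 : k = "team" <;> simp_all <;> ring

theorem pvFold_eq (tools : List (String × Int)) (acc : Int) :
    tools.foldl (fun earnings p =>
      if p.1 == "teeth" then earnings + 1 * p.2
      else if p.1 == "scissors" then earnings + 5 * p.2
      else if p.1 == "old-timey" then earnings + 50 * p.2
      else if p.1 == "fancy" then earnings + 100 * p.2
      else if p.1 == "team" then earnings + 250 * p.2
      else earnings) acc = acc + earn_money_alt tools := by
  induction tools generalizing acc with
  | nil => simp [pvAlt_nil]
  | cons p rest ih =>
      obtain ⟨k, v⟩ := p
      rw [List.foldl_cons, ih, pvAlt_cons]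
      by_cases h1 : k = "teeth" <;> by_cases h2 : k = "scissors" <;>
        by_cases h3 : k = "old-timey" <;> by_cases h4 : k = "fancy" <;>
        by_cases h5 : k = "team" <;> simp_all <;> ring

-- ===== VERDICT (by name: the statement is the Claim_ definition above) =====
theorem earn_money_spec : Claim_equal_earn_money := by
  intro tools _
  unfold Spec_earn_money earn_money
  rw [pvFold_eq tools 0]
  ring
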